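-- pv_equiv track=rewrite | github.com/SebastianMorera/CheckIO | Home.py | remove_min_max
-- ===== SOURCE A (Python) =====
-- def remove_min_max(data: set[int], total: int) -> set[int]:
--     if total != 0:
--         for x in range(total):
--             if len(data) >= 2:
--                 data.remove(min(data))
--                 data.remove(max(data))
--             else:
--                 data.clear()
--     return data
-- ===== SOURCE B (Python) =====
-- def remove_min_max(data: set, total: int) -> set:
--     if total > 0:
--         n = len(data)
--         kept = sorted(data)[total:n - total] if n >= 2 * total else []
--         data.intersection_update(kept)
--     return data
-- ===== Notes on version B (the rewrite author's own statement) =====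
-- stated objective: faster
-- what changed: A repeatedly scans the set to remove its min and max total times (O(total*n)); B sorts once and intersects the set with the middle slice sorted(data)[total:n-total] (empty when n < 2*total), O(n log n).
import Mathlib
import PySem

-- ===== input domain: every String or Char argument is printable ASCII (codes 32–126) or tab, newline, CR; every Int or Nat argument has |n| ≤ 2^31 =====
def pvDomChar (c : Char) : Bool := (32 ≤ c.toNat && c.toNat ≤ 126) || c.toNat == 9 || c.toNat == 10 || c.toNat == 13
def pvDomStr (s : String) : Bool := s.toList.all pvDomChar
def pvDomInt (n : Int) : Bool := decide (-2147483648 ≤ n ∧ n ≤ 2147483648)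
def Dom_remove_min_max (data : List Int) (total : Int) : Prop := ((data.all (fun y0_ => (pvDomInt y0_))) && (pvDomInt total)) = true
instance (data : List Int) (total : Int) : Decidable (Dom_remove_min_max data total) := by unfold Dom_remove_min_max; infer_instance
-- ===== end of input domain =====

-- B replaces A's O(total·n) repeated min/max removal loop by one sort and a middle slice (asymptotically faster);
-- both A and B mutate the argument set in place in Python — the equivalence proved here is about the returned set's contents.


-- ===== PORT A =====
def remove_min_max (data : List Int) (total : Int) : List Int :=
  if total ≠ 0 then
    (PySem.List.pyRange 0 total 1).foldl (fun d _ =>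
      if 2 ≤ PySem.Set.len d then
        -- data.remove(min(data)); data.remove(max(data)): min/max exist (len ≥ 2) and are members, so remove? is some; .getD guards totality
        let d1 := (PySem.Set.remove? d ((PySem.List.min? d (fun v => v)).getD 0)).getD d
        (PySem.Set.remove? d1 ((PySem.List.max? d1 (fun v => v)).getD 0)).getD d1
      else []) data
  else data

-- ===== PORT B =====
def remove_min_max_alt (data : List Int) (total : Int) : List Int :=
  if 0 < total then
    let n : Int := PySem.Set.len data
    let kept : List Int :=
      if 2 * total ≤ n then
        PySem.List.slice (PySem.List.sorted data (fun v => v) false) (some total) (some (n - total))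
      else []
    PySem.Set.inter data kept
  else data

-- ===== PRECONDITION & SPEC =====
-- data models a Python set[int]: its elements are distinct (the type convention's List-as-set encoding).
def Pre_remove_min_max (data : List Int) (total : Int) : Prop := data.Nodup
instance (data : List Int) (total : Int) : Decidable (Pre_remove_min_max data total) := by unfold Pre_remove_min_max; infer_instance
def pvWitness_remove_min_max : List Int × Int := ([3, 1, 4, 2, 7], 1)
def Spec_remove_min_max (data : List Int) (total : Int) (out : List Int) : Prop := out = remove_min_max_alt data total
instance (data : List Int) (total : Int) (out : List Int) : Decidable (Spec_remove_min_max data total out) := by unfold Spec_remove_min_max; infer_instance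

-- ===== CLAIM (what is proved, stated in full; the proofs are below) =====
def Claim_equal_remove_min_max : Prop := ∀ (data : List Int) (total : Int), Dom_remove_min_max data total → Pre_remove_min_max data total → Spec_remove_min_max data total (remove_min_max data total)

-- ===== LEMMAS AND PROOFS =====

-- A's loop body as a standalone step function
def pvStep (d : List Int) : List Int :=
  if 2 ≤ PySem.Set.len d then
    let d1 := (PySem.Set.remove? d ((PySem.List.min? d (fun v => v)).getD 0)).getD d
    (PySem.Set.remove? d1 ((PySem.List.max? d1 (fun v => v)).getD 0)).getD d1
  else []

-- survival predicate: x survives k rounds iff at least k elements below it and k above it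
def pvKeep (d : List Int) (k : Nat) (x : Int) : Bool :=
  decide (k ≤ d.countP (fun y => decide (y < x))) && decide (k ≤ d.countP (fun y => decide (x < y)))

lemma pv_foldl_const {α β : Type} (f : α → α) (l : List β) (a : α) :
    l.foldl (fun x _ => f x) a = f^[l.length] a := by
  induction l generalizing a with
  | nil => rfl
  | cons h t ih => simpa [Function.iterate_succ_apply] using ih (f a)

lemma pvA_eq_iter (data : List Int) (total : Int) :
    remove_min_max data total = pvStep^[total.toNat] data := by
  unfold remove_min_max
  by_cases h : total = 0
  · simp [h]
  · rw [if_pos h]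
    have : ((PySem.List.pyRange 0 total 1).foldl (fun d (_ : Int) => pvStep d) data) = pvStep^[total.toNat] data := by
      rw [pv_foldl_const, PySem.List.length_pyRange_one]
      norm_num
    simpa [pvStep] using this

lemma pv_countP_and_ne (d : List Int) (hd : d.Nodup) (a : Int) (ha : a ∈ d) (q : Int → Bool) :
    d.countP (fun y => q y && !(y == a)) = d.countP q - (if q a then 1 else 0) := by
  induction d with
  | nil => cases ha
  | cons h t ih =>
    rw [List.nodup_cons] at hd
    rw [List.countP_cons, List.countP_cons]
    rcases List.mem_cons.1 ha with rfl | hat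
    · have hcongr : t.countP (fun y => q y && !(y == a)) = t.countP q := by
        apply List.countP_congr
        intro y hy
        have hne : y ≠ a := fun e => hd.1 (e ▸ hy)
        simp [hne]
      rw [hcongr]
      by_cases hq : q a <;> simp [hq]
    · have hne : h ≠ a := fun e => hd.1 (e ▸ hat)
      have hpos : (if q a then 1 else 0) ≤ t.countP q := by
        by_cases hq : q a
        · have : 0 < t.countP q := List.countP_pos_iff.2 ⟨a, hat, hq⟩
          simp only [hq, if_true]; omega
        · simp [hq]
      rw [ih hd.2 hat]
      have hbeq : (h == a) = false := by simp [hne]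
      rw [hbeq]
      by_cases hq : q h <;> by_cases hqa : q a <;>
        simp only [hq, hqa, if_true, Bool.not_false, Bool.and_true] at hpos ⊢ <;> omega

lemma pv_cnt_sum (d : List Int) (hd : d.Nodup) (x : Int) (hx : x ∈ d) :
    d.countP (fun y => decide (y < x)) + d.countP (fun y => decide (x < y)) + 1 = d.length := by
  induction d with
  | nil => cases hx
  | cons h t ih =>
    rw [List.nodup_cons] at hd
    rw [List.countP_cons, List.countP_cons, List.length_cons]
    rcases List.mem_cons.1 hx with rfl | hxt
    · have hlen : t.length = t.countP (fun y => decide (y < x)) + t.countP (fun y => decide ¬(decide (y < x)) = true) :=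
        List.length_eq_countP_add_countP _
      have hcongr : t.countP (fun y => decide ¬(decide (y < x)) = true) = t.countP (fun y => decide (x < y)) := by
        apply List.countP_congr
        intro y hy
        have hne : y ≠ x := fun e => hd.1 (e ▸ hy)
        simp only [decide_eq_true_eq]
        exact ⟨fun hnl => lt_of_le_of_ne (not_lt.1 hnl) (Ne.symm hne), fun hl => not_lt.2 (le_of_lt hl)⟩
      rw [hcongr] at hlen
      simp
      omega
    · have hne : h ≠ x := fun e => hd.1 (e ▸ hxt)
      have hs := ih hd.2 hxt
      rcases lt_or_gt_of_ne hne with hlt | hgt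
      · have h2 : ¬ (x < h) := not_lt.2 (le_of_lt hlt)
        simp [hlt, h2]; omega
      · have h2 : ¬ (h < x) := not_lt.2 (le_of_lt hgt)
        simp [h2, hgt]; omega

lemma pv_step_eq_filter (d : List Int) (hd : d.Nodup) (h2 : 2 ≤ d.length) :
    ∃ m M, m ∈ d ∧ M ∈ d ∧ (∀ y ∈ d, m ≤ y) ∧ (∀ y ∈ d, y ≤ M) ∧ m ≠ M ∧
      pvStep d = d.filter (fun x => !(x == m) && !(x == M)) := by
  have hdne : d ≠ [] := by intro e; rw [e] at h2; simp at h2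
  obtain ⟨m, hm⟩ : ∃ m, PySem.List.min? d (fun v => v) = some m := by
    cases hmin : PySem.List.min? d (fun v => v) with
    | none => exact absurd ((PySem.List.min?_eq_none_iff _ _).1 hmin) hdne
    | some m => exact ⟨m, rfl⟩
  have hmmem : m ∈ d := PySem.List.min?_mem hm
  have hmin : ∀ y ∈ d, m ≤ y := PySem.List.min?_isMin hm
  have hrem1 : PySem.Set.remove? d m = some (PySem.Set.discard d m) := PySem.Set.remove?_of_mem hmmem
  set d1 := PySem.Set.discard d m with hd1def
  have hd1f : d1 = d.filter (fun y => !(y == m)) := rfl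
  have hcnt1 : d.countP (fun y => y == m) = 1 := by
    have h1 : d.count m = 1 := List.count_eq_one_of_mem hd hmmem
    simpa [List.count] using h1
  have hd1len : d1.length + 1 = d.length := by
    have h := List.length_eq_countP_add_countP (fun y => y == m) (l := d)
    have hcne : d.countP (fun a => decide ¬(a == m) = true) = d.countP (fun y => !(y == m)) :=
      List.countP_congr (by intro x _; simp)
    rw [hcnt1, hcne] at h
    have hlf : d1.length = d.countP (fun y => !(y == m)) := by
      rw [hd1f, ← List.countP_eq_length_filter]
    omega
  have hd1ne : d1 ≠ [] := by
    intro e; rw [e] at hd1len; simp at hd1len; omega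
  obtain ⟨M, hM⟩ : ∃ M, PySem.List.max? d1 (fun v => v) = some M := by
    cases hmax : PySem.List.max? d1 (fun v => v) with
    | none => exact absurd ((PySem.List.max?_eq_none_iff _ _).1 hmax) hd1ne
    | some M => exact ⟨M, rfl⟩
  have hMd1 : M ∈ d1 := PySem.List.max?_mem hM
  have hmax1 : ∀ y ∈ d1, y ≤ M := PySem.List.max?_isMax hM
  have hMd : M ∈ d := by
    rw [hd1f] at hMd1; exact List.mem_of_mem_filter hMd1
  have hMnem : ¬ (M == m) = true := by
    rw [hd1f] at hMd1
    have := List.of_mem_filter hMd1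
    simpa using this
  have hne : m ≠ M := fun e => hMnem (by simp [e.symm])
  have hmax : ∀ y ∈ d, y ≤ M := by
    intro y hy
    by_cases hym : y = m
    · subst hym; exact hmin M hMd
    · exact hmax1 y (by rw [hd1f]; exact List.mem_filter.2 ⟨hy, by simp [hym]⟩)
  refine ⟨m, M, hmmem, hMd, hmin, hmax, hne, ?_⟩
  have hrem2 : PySem.Set.remove? d1 M = some (PySem.Set.discard d1 M) := PySem.Set.remove?_of_mem hMd1
  unfold pvStep
  rw [if_pos (by simp [PySem.Set.len]; omega)]
  simp only [hm, Option.getD_some, hrem1, hM, hrem2]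
  show List.filter (fun y => !(y == M)) (List.filter (fun y => !(y == m)) d) = _
  rw [List.filter_filter]
  exact List.filter_congr (by intro x _; rw [Bool.and_comm])

lemma pv_iter_char (k : Nat) (d : List Int) (hd : d.Nodup) :
    pvStep^[k] d = d.filter (pvKeep d k) := by
  induction k generalizing d with
  | zero =>
    rw [Function.iterate_zero, id]
    symm
    rw [List.filter_eq_self]
    intro a _
    simp [pvKeep]
  | succ k ih =>
    rw [Function.iterate_succ_apply]
    by_cases h2 : 2 ≤ d.length
    · obtain ⟨m, M, hm, hM, hmin, hmax, hne, hstep⟩ := pv_step_eq_filter d hd h2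
      rw [hstep, ih _ (List.Nodup.filter _ hd), List.filter_filter]
      apply List.filter_congr
      intro x hx
      by_cases hxm : x = m
      · subst hxm
        have hlt0 : d.countP (fun y => decide (y < x)) = 0 :=
          List.countP_eq_zero.2 (fun y hy => by simpa using not_lt.2 (hmin y hy))
        simp [pvKeep, hlt0]
      · by_cases hxM : x = M
        · subst hxM
          have hgt0 : d.countP (fun y => decide (x < y)) = 0 :=
            List.countP_eq_zero.2 (fun y hy => by simpa using not_lt.2 (hmax y hy))
          simp [pvKeep, hgt0]
        · have hmx : m < x := lt_of_le_of_ne (hmin x hx) (Ne.symm hxm)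
          have hxM' : x < M := lt_of_le_of_ne (hmax x hx) hxM
          have hclt : (d.filter (fun x => !(x == m) && !(x == M))).countP (fun y => decide (y < x))
              = d.countP (fun y => decide (y < x)) - 1 := by
            rw [List.countP_filter]
            have e1 : d.countP (fun y => decide (y < x) && (!(y == m) && !(y == M)))
                = d.countP (fun y => (decide (y < x) && !(y == m)) && !(y == M)) :=
              List.countP_congr (by intro y _; rw [Bool.and_assoc])
            rw [e1, pv_countP_and_ne d hd M hM, pv_countP_and_ne d hd m hm]
            have h1 : ¬ (M < x) := not_lt.2 (le_of_lt hxM')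
            simp [hmx, h1]
          have hcgt : (d.filter (fun x => !(x == m) && !(x == M))).countP (fun y => decide (x < y))
              = d.countP (fun y => decide (x < y)) - 1 := by
            rw [List.countP_filter]
            have e1 : d.countP (fun y => decide (x < y) && (!(y == m) && !(y == M)))
                = d.countP (fun y => (decide (x < y) && !(y == m)) && !(y == M)) :=
              List.countP_congr (by intro y _; rw [Bool.and_assoc])
            rw [e1, pv_countP_and_ne d hd M hM, pv_countP_and_ne d hd m hm]
            have h1 : ¬ (x < m) := not_lt.2 (le_of_lt hmx)
            have h2 : (M == m) = false := by simp [Ne.symm hne]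
            simp [hxM', h1, h2]
          have hc1 : 1 ≤ d.countP (fun y => decide (y < x)) :=
            List.countP_pos_iff.2 ⟨m, hm, by simpa using hmx⟩
          have hc2 : 1 ≤ d.countP (fun y => decide (x < y)) :=
            List.countP_pos_iff.2 ⟨M, hM, by simpa using hxM'⟩
          simp only [pvKeep, hclt, hcgt]
          have hb1 : (x == m) = false := by simp [hxm]
          have hb2 : (x == M) = false := by simp [hxM]
          rw [hb1, hb2]
          simp only [Bool.not_false, Bool.and_true]
          congr 1 <;> rw [decide_eq_decide] <;> omega
    · have hnil : pvStep d = [] := by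
        unfold pvStep
        rw [if_neg]
        simp only [PySem.Set.len]
        omega
      rw [hnil, Function.iterate_fixed (by unfold pvStep; simp [PySem.Set.len])]
      symm
      rw [List.filter_eq_nil_iff]
      intro x hx
      have := pv_cnt_sum d hd x hx
      simp only [pvKeep, Bool.and_eq_true, decide_eq_true_eq, not_and]
      intro h1 h2
      omega

lemma pv_mem_drop_iff (s : List Int) (hs : s.Pairwise (· < ·)) (k : Nat) (x : Int) :
    x ∈ s.drop k ↔ x ∈ s ∧ k ≤ s.countP (fun y => decide (y < x)) := by
  induction k generalizing s with
  | zero => simp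
  | succ k ih =>
    cases s with
    | nil => simp
    | cons h t =>
      rw [List.pairwise_cons] at hs
      rw [List.drop_succ_cons, ih t hs.2, List.countP_cons]
      by_cases hx : x ∈ t
      · have hhx : h < x := hs.1 x hx
        simp only [hhx, decide_true, if_true]
        constructor
        · rintro ⟨_, hc⟩; exact ⟨List.mem_cons_of_mem h hx, by omega⟩
        · rintro ⟨_, hc⟩; exact ⟨hx, by omega⟩
      · constructor
        · rintro ⟨hx', _⟩; exact absurd hx' hx
        · rintro ⟨hmem, hc⟩
          rcases List.mem_cons.1 hmem with rfl | hx'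
          · exfalso
            have h0 : t.countP (fun y => decide (y < x)) = 0 :=
              List.countP_eq_zero.2 (fun y hy => by simpa using not_lt.2 (le_of_lt (hs.1 y hy)))
            simp [h0] at hc
          · exact absurd hx' hx

lemma pv_mem_take_iff (s : List Int) (hs : s.Pairwise (· < ·)) (m : Nat) (x : Int) :
    x ∈ s.take m ↔ x ∈ s ∧ s.countP (fun y => decide (y < x)) < m := by
  induction m generalizing s with
  | zero => simp
  | succ m ih =>
    cases s with
    | nil => simp
    | cons h t =>
      rw [List.pairwise_cons] at hs
      rw [List.take_succ_cons, List.countP_cons]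
      by_cases hxh : x = h
      · subst hxh
        have h0 : t.countP (fun y => decide (y < x)) = 0 :=
          List.countP_eq_zero.2 (fun y hy => by simpa using not_lt.2 (le_of_lt (hs.1 y hy)))
        simp [h0]
      · have hxiff := ih t hs.2 -- x ∈ take m t ↔ ...
        constructor
        · intro hmem
          rcases List.mem_cons.1 hmem with rfl | hmt
          · exact absurd rfl hxh
          · obtain ⟨hxt, hc⟩ := hxiff.1 hmt
            have hhx : h < x := hs.1 x hxt
            refine ⟨List.mem_cons_of_mem h hxt, ?_⟩
            simp only [hhx, decide_true, if_true]
            omega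
        · rintro ⟨hmem, hc⟩
          rcases List.mem_cons.1 hmem with rfl | hxt
          · exact absurd rfl hxh
          · have hhx : h < x := hs.1 x hxt
            simp only [hhx, decide_true, if_true] at hc
            exact List.mem_cons_of_mem h (hxiff.2 ⟨hxt, by omega⟩)

lemma pv_countP_drop (s : List Int) (hs : s.Pairwise (· < ·)) (k : Nat) (x : Int) (hx : x ∈ s.drop k) :
    (s.drop k).countP (fun y => decide (y < x)) = s.countP (fun y => decide (y < x)) - k := by
  have hsplit := List.take_append_drop k s
  have hcnt : s.countP (fun y => decide (y < x))
      = (s.take k).countP (fun y => decide (y < x)) + (s.drop k).countP (fun y => decide (y < x)) := by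
    conv_lhs => rw [← hsplit]
    rw [List.countP_append]
  have hcross : ∀ y ∈ s.take k, y < x := by
    intro y hy
    have hp : List.Pairwise (· < ·) (s.take k ++ s.drop k) := by rw [hsplit]; exact hs
    exact (List.pairwise_append.1 hp).2.2 y hy x hx
  have htk : (s.take k).countP (fun y => decide (y < x)) = (s.take k).length := by
    rw [List.countP_eq_length]
    intro y hy
    simpa using hcross y hy
  have hklen : k ≤ s.length := by
    by_contra hcon
    rw [List.drop_eq_nil_of_le (by omega)] at hx
    cases hx
  rw [hcnt, htk, List.length_take, min_eq_left hklen]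
  omega

-- ===== VERDICT (by name: the statement is the Claim_ definition above) =====
theorem remove_min_max_spec : Claim_equal_remove_min_max := by
  intro data total _ hpre
  unfold Spec_remove_min_max
  rw [pvA_eq_iter]
  unfold remove_min_max_alt
  by_cases ht : 0 < total
  · rw [if_pos ht]
    rw [pv_iter_char _ _ hpre]
    show _ = PySem.Set.inter data
      (if 2 * total ≤ PySem.Set.len data then
        PySem.List.slice (PySem.List.sorted data (fun v => v) false) (some total)
          (some (PySem.Set.len data - total))
      else [])
    have hinter : ∀ kept : List Int, PySem.Set.inter data kept = data.filter (fun x => kept.contains x) := by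
      intro kept; simp [PySem.Set.inter]
    rw [hinter]
    apply List.filter_congr
    intro x hx
    have hperm : (PySem.List.sorted data (fun v => v) false).Perm data :=
      PySem.List.sorted_perm data (fun v => v) false
    have hlen : PySem.Set.len data = (data.length : Int) := by simp [PySem.Set.len]
    have hnods : (PySem.List.sorted data (fun v => v) false).Nodup := hperm.nodup_iff.2 hpre
    have hpair : (PySem.List.sorted data (fun v => v) false).Pairwise (· < ·) :=
      ((PySem.List.sorted_pairwise data (fun v => v)).and hnods).imp
        (fun h => lt_of_le_of_ne h.1 h.2)
    have hsum := pv_cnt_sum data hpre x hx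
    rw [hlen]
    by_cases hn : 2 * total ≤ (data.length : Int)
    · rw [if_pos hn]
      rw [PySem.List.slice_toNat _ (le_of_lt ht) (by omega)]
      rw [Bool.eq_iff_iff]
      have hdp : (PySem.List.sorted data (fun v => v) false).drop total.toNat |>.Pairwise (· < ·) :=
        List.Pairwise.sublist (List.drop_sublist _ _) hpair
      rw [pvKeep]
      simp only [Bool.and_eq_true, decide_eq_true_eq, List.contains_iff_mem]
      rw [pv_mem_take_iff _ hdp]
      rw [pv_mem_drop_iff _ hpair]
      have hcl : (PySem.List.sorted data (fun v => v) false).countP (fun y => decide (y < x))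
          = data.countP (fun y => decide (y < x)) := hperm.countP_eq _
      have hmemiff : x ∈ PySem.List.sorted data (fun v => v) false := hperm.mem_iff.2 hx
      constructor
      · rintro ⟨h1, h2⟩
        have hxd : x ∈ (PySem.List.sorted data (fun v => v) false).drop total.toNat := by
          rw [pv_mem_drop_iff _ hpair]
          exact ⟨hmemiff, by omega⟩
        refine ⟨⟨hmemiff, by omega⟩, ?_⟩
        rw [pv_countP_drop _ hpair _ _ hxd, hcl]
        omega
      · rintro ⟨⟨hms, h1⟩, h2⟩
        have hxd : x ∈ (PySem.List.sorted data (fun v => v) false).drop total.toNat := by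
          rw [pv_mem_drop_iff _ hpair]
          exact ⟨hms, h1⟩
        rw [pv_countP_drop _ hpair _ _ hxd, hcl] at h2
        rw [hcl] at h1
        constructor
        · omega
        · omega
    · rw [if_neg hn]
      rw [Bool.eq_iff_iff]
      rw [pvKeep]
      simp only [Bool.and_eq_true, decide_eq_true_eq, List.contains_iff_mem, List.not_mem_nil,
        iff_false, not_and]
      intro h1 h2
      omega
  · rw [if_neg ht]
    rw [Int.toNat_of_nonpos (not_lt.1 ht), Function.iterate_zero, id]
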